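-- pv_equiv track=rewrite | github.com/kochrufet/PyCC | pycommentcipher.py | ConvertToPythonComment
-- ===== SOURCE A (Python) =====
-- def ConvertToPythonComment(data,col = 32):
-- 	_str_ = ""
-- 	for i in range(0, len(data)):
-- 		if not i%col:
-- 			if i:
-- 				_str_ += '\n'
--
-- 			_str_ += '#'
--
-- 		_str_ += data[i]
--
-- 	return _str_
-- ===== SOURCE B (Python) =====
-- def ConvertToPythonComment(data, col=32):
--     return '\n'.join('#' + ''.join(data[i:i + col])
--                      for i in range(0, len(data), col))
-- ===== Notes on version B (the rewrite author's own statement) =====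
-- stated objective: faster
-- what changed: B replaces A's per-character loop (modulo test plus newline and hash-mark bookkeeping per character) by a single stride over chunk start indices, slicing each fixed-width chunk and joining the hash-prefixed lines with the newline separator.
-- outside the precondition, e.g. on ConvertToPythonComment('ab', -1): A returns '#a\n#b', B returns ''; on ConvertToPythonComment('', 0): A returns '', B raises ValueError
import Mathlib
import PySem

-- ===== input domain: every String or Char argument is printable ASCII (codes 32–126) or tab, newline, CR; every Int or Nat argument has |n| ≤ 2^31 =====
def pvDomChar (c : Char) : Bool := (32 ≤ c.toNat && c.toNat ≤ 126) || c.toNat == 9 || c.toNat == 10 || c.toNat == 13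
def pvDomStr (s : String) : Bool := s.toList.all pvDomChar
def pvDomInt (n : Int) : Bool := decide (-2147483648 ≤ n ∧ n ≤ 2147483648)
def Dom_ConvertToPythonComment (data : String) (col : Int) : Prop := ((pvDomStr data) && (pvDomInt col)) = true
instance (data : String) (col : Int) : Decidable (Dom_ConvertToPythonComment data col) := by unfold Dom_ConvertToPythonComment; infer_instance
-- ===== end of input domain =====

-- B replaces A's per-character loop (modulo test plus per-character bookkeeping) by a
-- stride over chunk start indices, slicing each fixed-width chunk and joining the
-- hash-prefixed lines with the newline separator (measured faster by a constant factor).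

-- ===== PORT A =====
-- data[i] is always in range (i < len(data)), so the IndexError branch is unreachable;
-- pyGetD with a dummy default is exact here.
def ConvertToPythonComment (data : String) (col : Int) : String :=
  String.ofList <|
    (PySem.List.pyRange 0 (PySem.Str.len data) 1).foldl
      (fun s i =>
        (if PySem.Int.mod i col = 0 then
            (if i ≠ 0 then s ++ ['\n'] else s) ++ ['#']
          else s)
        ++ [PySem.List.pyGetD data.toList i ' ']) []

-- ===== PORT B =====
def ConvertToPythonComment_alt (data : String) (col : Int) : String :=
  String.ofList <|
    PySem.Chars.join ['\n']
      ((PySem.List.pyRange 0 (PySem.Str.len data) col).map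
        (fun i => '#' :: PySem.List.slice data.toList (some i) (some (i + col))))

-- ===== PRECONDITION & SPEC =====
-- Pre_ restricts to the natural domain col > 0 (a positive line width): col = 0 makes A raise
-- ZeroDivisionError on nonempty data (and B raise ValueError even on empty data), and for
-- negative col A's grouping by |col| is an artefact of Python's negative-divisor modulo,
-- where B naturally returns the empty string.
def Pre_ConvertToPythonComment (data : String) (col : Int) : Prop := 0 < col
instance (data : String) (col : Int) : Decidable (Pre_ConvertToPythonComment data col) := by
  unfold Pre_ConvertToPythonComment; infer_instance
def pvWitness_ConvertToPythonComment : String × Int := ("hello world", 4)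

def Spec_ConvertToPythonComment (data : String) (col : Int) (out : String) : Prop :=
  out = ConvertToPythonComment_alt data col
instance (data : String) (col : Int) (out : String) : Decidable (Spec_ConvertToPythonComment data col out) := by
  unfold Spec_ConvertToPythonComment; infer_instance

-- ===== CLAIM (what is proved, stated in full; the proofs are below) =====
def Claim_equal_ConvertToPythonComment : Prop := ∀ (data : String) (col : Int), Dom_ConvertToPythonComment data col → Pre_ConvertToPythonComment data col → Spec_ConvertToPythonComment data col (ConvertToPythonComment data col)

-- ===== LEMMAS AND PROOFS =====

-- A's loop, as structural recursion over the remaining characters with the running index.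
def pvLoop (col : Int) : List Char → Nat → List Char → List Char
  | [], _, s => s
  | ch :: t, i, s =>
      pvLoop col t (i + 1)
        ((if PySem.Int.mod (i : Int) col = 0 then
            (if (i : Int) ≠ 0 then s ++ ['\n'] else s) ++ ['#']
          else s) ++ [ch])

-- chunks of width m+1
def pvChunks (m : Nat) : List Char → List (List Char)
  | [] => []
  | a :: t => (a :: t.take m) :: pvChunks m (t.drop m)
termination_by l => l.length
decreasing_by simp [List.length_drop]

def pvG (cn : Nat) (l : List Char) : List Char :=
  PySem.Chars.join ['\n'] ((pvChunks (cn - 1) l).map (fun ch => '#' :: ch))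

theorem pvLoop_eq_fold (col : Int) :
    ∀ (t pre : List Char) (s : List Char),
      (PySem.List.pyRange (pre.length : Int) ((pre.length + t.length : Nat) : Int) 1).foldl
        (fun s i =>
          (if PySem.Int.mod i col = 0 then
              (if i ≠ 0 then s ++ ['\n'] else s) ++ ['#']
            else s)
          ++ [PySem.List.pyGetD (pre ++ t) i ' ']) s
      = pvLoop col t pre.length s := by
  intro t
  induction t with
  | nil =>
      intro pre s
      rw [PySem.List.pyRange_one_eq_nil (by simp)]
      rfl
  | cons ch t ih =>
      intro pre s
      rw [PySem.List.pyRange_one_cons (by simp)]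
      rw [List.foldl_cons]
      have hget : PySem.List.pyGetD (pre ++ ch :: t) (pre.length : Int) ' ' = ch := by
        rw [PySem.List.pyGetD_natCast]
        simp [List.getD]
      rw [hget]
      have := ih (pre ++ [ch])
        ((if PySem.Int.mod (pre.length : Int) col = 0 then
            (if (pre.length : Int) ≠ 0 then s ++ ['\n'] else s) ++ ['#']
          else s) ++ [ch])
      simp only [List.append_assoc, List.singleton_append, List.length_append,
        List.length_cons, List.length_nil] at this ⊢
      rw [show ((pre.length : Int) + 1) = ((pre.length + 1 : Nat) : Int) by push_cast; ring]
      rw [show (pre.length + (t.length + 1)) = (pre.length + 1 + t.length) by omega]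
      rw [this]
      rfl

theorem pvLoop_append (col : Int) (a b : List Char) :
    ∀ (i : Nat) (s : List Char),
      pvLoop col (a ++ b) i s = pvLoop col b (i + a.length) (pvLoop col a i s) := by
  induction a with
  | nil => intro i s; simp [pvLoop]
  | cons ch t ih =>
      intro i s
      simp only [List.cons_append, pvLoop, List.length_cons]
      rw [ih]
      congr 1
      omega

theorem pvLoop_skip (cn : Nat) :
    ∀ (t : List Char) (i : Nat) (s : List Char),
      (∀ j, j < t.length → (i + j) % cn ≠ 0) → pvLoop (cn : Int) t i s = s ++ t := by
  intro t
  induction t with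
  | nil => intro i s _; simp [pvLoop]
  | cons ch t ih =>
      intro i s h
      have h0 : i % cn ≠ 0 := by
        have := h 0 (by simp)
        simpa using this
      have hmod : PySem.Int.mod (i : Int) (cn : Int) ≠ 0 := by
        rw [PySem.Int.mod_natCast]
        exact_mod_cast h0
      simp only [pvLoop, hmod, if_false]
      rw [ih (i + 1) (s ++ [ch]) (by
        intro j hj
        rw [show i + 1 + j = i + (j + 1) by omega]
        exact h (j + 1) (by simp; omega))]
      simp

theorem pvLoop_main (cn : Nat) (hcn : 0 < cn) :
    ∀ (t : List Char) (q : Nat) (s : List Char),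
      pvLoop (cn : Int) t (q * cn) s
        = s ++ (if t = [] then [] else (if q = 0 then ([] : List Char) else ['\n']) ++ pvG cn t) := by
  intro t
  induction t using pvChunks.induct (m := cn - 1) with
  | case1 => intro q s; simp [pvLoop]
  | case2 ch t' ih =>
      intro q s
      -- head character: index q*cn, divisible by cn
      have hmod0 : PySem.Int.mod ((q * cn : Nat) : Int) (cn : Int) = 0 := by
        rw [PySem.Int.mod_natCast, Nat.mul_mod_left]; rfl
      have hne : (((q * cn : Nat) : Int) ≠ 0) ↔ q ≠ 0 := by
        constructor
        · intro hh hq; apply hh; rw [hq]; simp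
        · intro hq hh
          have h0 : q * cn = 0 := by exact_mod_cast hh
          rcases Nat.mul_eq_zero.mp h0 with h | h
          · exact absurd h hq
          · omega
      simp only [pvLoop]
      rw [if_pos hmod0]
      set s1 : List Char :=
        ((if ((q * cn : Nat) : Int) ≠ 0 then s ++ ['\n'] else s) ++ ['#']) ++ [ch] with hs1
      have hsplit : t' = t'.take (cn - 1) ++ t'.drop (cn - 1) := (List.take_append_drop _ _).symm
      rw [show pvLoop (cn : Int) t' (q * cn + 1) s1
            = pvLoop (cn : Int) (t'.take (cn - 1) ++ t'.drop (cn - 1)) (q * cn + 1) s1 by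
          rw [← hsplit]]
      rw [pvLoop_append]
      rw [pvLoop_skip cn (t'.take (cn - 1)) (q * cn + 1) s1 (by
        intro j hj
        have hj' : j < cn - 1 := by
          have := List.length_take_le (cn - 1) t'
          omega
        rw [show q * cn + 1 + j = cn * q + (1 + j) by ring, Nat.mul_add_mod]
        rw [Nat.mod_eq_of_lt (by omega)]
        omega)]
      by_cases hb : t'.drop (cn - 1) = []
      · -- last chunk
        have htk : t'.take (cn - 1) = t' := by
          rw [List.drop_eq_nil_iff] at hb
          exact List.take_of_length_le hb
        rw [hb, htk]
        simp only [pvLoop]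
        have hch : pvChunks (cn - 1) (ch :: t') = [ch :: t'.take (cn - 1)] := by
          rw [pvChunks, hb, pvChunks]
        simp only [if_neg (List.cons_ne_nil ch t'), pvG, hch, List.map_cons, List.map_nil,
          PySem.Chars.join_singleton, hs1, hne, htk]
        by_cases hq : q = 0 <;> simp [hq]
      · -- recurse on the next chunk
        have hlen : (t'.take (cn - 1)).length = cn - 1 := by
          rw [List.length_take]
          rw [List.drop_eq_nil_iff] at hb
          omega
        rw [hlen, show q * cn + 1 + (cn - 1) = (q + 1) * cn by
          have h1 : (q + 1) * cn = q * cn + cn := by ring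
          omega]
        rw [ih]
        have hch : pvChunks (cn - 1) (ch :: t') =
            (ch :: t'.take (cn - 1)) :: pvChunks (cn - 1) (t'.drop (cn - 1)) := by
          rw [pvChunks]
        have hchb : pvChunks (cn - 1) (t'.drop (cn - 1)) ≠ [] := by
          cases hd : t'.drop (cn - 1) with
          | nil => exact absurd hd hb
          | cons x xs => rw [pvChunks]; simp
        obtain ⟨p, rest, hpr⟩ : ∃ p rest, pvChunks (cn - 1) (t'.drop (cn - 1)) = p :: rest := by
          cases hx : pvChunks (cn - 1) (t'.drop (cn - 1)) with
          | nil => exact absurd hx hchb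
          | cons p rest => exact ⟨p, rest, rfl⟩
        simp only [if_neg hb, if_neg (List.cons_ne_nil ch t'), if_neg (Nat.succ_ne_zero q),
          pvG, hch, hpr, List.map_cons, PySem.Chars.join_cons_cons, hs1, hne]
        by_cases hq : q = 0 <;> simp [hq]

theorem pvRange_cons_pos (c b : Int) (hc : 0 < c) (hb : 0 < b) :
    PySem.List.pyRange 0 b c = 0 :: (PySem.List.pyRange 0 (b - c) c).map (· + c) := by
  rw [PySem.List.pyRange_of_pos 0 b hc, PySem.List.pyRange_of_pos 0 (b - c) hc]
  by_cases hcb : c < b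
  · have hq0 : 0 ≤ (b - c - 0 + c - 1) / c := Int.ediv_nonneg (by omega) (by omega)
    have hstep : (b - 0 + c - 1) / c = (b - c - 0 + c - 1) / c + 1 := by
      have := Int.add_mul_ediv_right (b - c - 0 + c - 1) 1 (by omega : c ≠ 0)
      rw [show b - 0 + c - 1 = b - c - 0 + c - 1 + 1 * c by ring]
      omega
    rw [if_pos (by omega : (0:Int) < b), if_pos (by omega : (0:Int) < b - c), hstep]
    rw [show ((b - c - 0 + c - 1) / c + 1).toNat = ((b - c - 0 + c - 1) / c).toNat + 1 by omega]
    rw [List.range_succ_eq_map]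
    simp only [List.map_cons, List.map_map]
    congr 1
    · simp
    · apply List.map_congr_left
      intro k _
      simp only [Function.comp_apply, Nat.succ_eq_add_one]
      push_cast
      ring
  · have h1 : (b - 0 + c - 1) / c = 1 := by
      have hlow : (1:Int) ≤ (b - 0 + c - 1) / c :=
        (Int.le_ediv_iff_mul_le hc).mpr (by omega)
      have hhigh : (b - 0 + c - 1) / c < 2 :=
        (Int.ediv_lt_iff_lt_mul hc).mpr (by omega)
      omega
    rw [if_pos (by omega : (0:Int) < b), if_neg (by omega : ¬ (0:Int) < b - c), h1]
    simp

theorem pvB_chunks (cn : Nat) (hcn : 0 < cn) :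
    ∀ (l : List Char),
      (PySem.List.pyRange 0 (l.length : Int) (cn : Int)).map
          (fun i => '#' :: PySem.List.slice l (some i) (some (i + (cn : Int))))
        = (pvChunks (cn - 1) l).map (fun ch => '#' :: ch) := by
  have hc : (0:Int) < (cn : Int) := by exact_mod_cast hcn
  intro l
  induction l using pvChunks.induct (m := cn - 1) with
  | case1 =>
      simp only [List.length_nil, Nat.cast_zero]
      rw [PySem.List.pyRange_of_pos 0 0 hc]
      simp [pvChunks]
  | case2 ch t' ih =>
      rw [pvRange_cons_pos (cn : Int) ((ch :: t').length : Int) hc (by simp)]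
      rw [List.map_cons, List.map_map, pvChunks, List.map_cons]
      congr 1
      · -- first chunk
        rw [zero_add, PySem.List.slice_toNat _ (by omega) (by omega)]
        simp only [Int.toNat_natCast, Int.toNat_zero, Nat.sub_zero, List.drop_zero]
        conv_lhs => rw [show cn = cn - 1 + 1 by omega]
        rw [List.take_succ_cons]
      · -- remaining chunks
        by_cases hle : cn ≤ (ch :: t').length
        · have hlen : (((ch :: t').length : Int) - (cn : Int)) = ((t'.drop (cn - 1)).length : Int) := by
            have h1 : (ch :: t').length = t'.length + 1 := List.length_cons ..
            have h2 : (t'.drop (cn - 1)).length = t'.length - (cn - 1) := List.length_drop ..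
            have h3 : cn ≤ t'.length + 1 := by
              simpa using hle
            rw [h1, h2]
            omega
          rw [hlen, ← ih]
          apply List.map_congr_left
          intro i hi
          have hi0 : 0 ≤ i := ((PySem.List.mem_pyRange_iff_of_pos hc i).mp hi).1
          simp only [Function.comp_apply]
          rw [PySem.List.slice_toNat _ (by omega) (by omega),
              PySem.List.slice_toNat _ (by omega) (by omega)]
          rw [show ((i + (cn:Int) + (cn:Int)).toNat - (i + (cn:Int)).toNat) = cn by omega,
              show ((i + (cn:Int)).toNat - i.toNat) = cn by omega,
              show (i + (cn:Int)).toNat = i.toNat + cn by omega]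
          rw [show t'.drop (cn - 1) = (ch :: t').drop cn by
                conv_rhs => rw [show cn = cn - 1 + 1 by omega]
                rw [List.drop_succ_cons]]
          simp [List.drop_drop, Nat.add_comm]
        · have hdrop : t'.drop (cn - 1) = [] := by
            rw [List.drop_eq_nil_iff]
            simp only [List.length_cons] at hle
            omega
          rw [hdrop, pvChunks, PySem.List.pyRange_of_pos _ _ hc,
              if_neg (by simp only [List.length_cons] at hle ⊢; omega)]
          simp

-- ===== VERDICT (by name: the statement is the Claim_ definition above) =====
theorem ConvertToPythonComment_spec : Claim_equal_ConvertToPythonComment := by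
  intro data col _ hpre
  unfold Pre_ConvertToPythonComment at hpre
  unfold Spec_ConvertToPythonComment
  have hcol : col = ((col.toNat : Nat) : Int) := (Int.toNat_of_nonneg hpre.le).symm
  set cn := col.toNat with hcn'
  have hcn : 0 < cn := by omega
  unfold ConvertToPythonComment ConvertToPythonComment_alt
  rw [hcol]
  have hlen : PySem.Str.len data = ((data.toList.length : Nat) : Int) := by
    simp [PySem.Str.len_eq]
  rw [hlen]
  -- A side
  have hA := pvLoop_eq_fold ((cn : Nat) : Int) data.toList [] []
  simp only [List.length_nil, List.nil_append, Nat.zero_add, Nat.cast_zero] at hA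
  rw [hA]
  have hM := pvLoop_main cn hcn data.toList 0 []
  rw [Nat.zero_mul] at hM
  rw [hM]
  -- B side
  rw [pvB_chunks cn hcn data.toList]
  by_cases hnil : data.toList = []
  · simp [hnil, pvChunks, PySem.Chars.join_nil]
  · simp only [if_neg hnil, pvG]
    simp
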